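-- pv_equiv track=rewrite | github.com/santino-rosso/Automatas-Gramaticas | proyectogrupo4.py | encontrar_usuario_max_trafico
-- ===== SOURCE A (Python) =====
-- def encontrar_usuario_max_trafico(trafico_por_usuario):
--     lista_valores = trafico_por_usuario.values()
--     trafico_maximo = max(lista_valores)
--     usuario_max_trafico = None
--     for usuario, trafico in trafico_por_usuario.items():
--         if trafico == trafico_maximo:
--             usuario_max_trafico = usuario
--     return usuario_max_trafico, trafico_maximo
-- ===== SOURCE B (Python) =====
-- def encontrar_usuario_max_trafico(trafico_por_usuario):
--     items = iter(trafico_por_usuario.items())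
--     usuario_max, trafico_max = next(items)
--     for usuario, trafico in items:
--         if trafico >= trafico_max:
--             usuario_max, trafico_max = usuario, trafico
--     return usuario_max, trafico_max
-- ===== Notes on version B (the rewrite author's own statement) =====
-- stated objective: simpler
-- what changed: Replaces A's two passes (max over values, then a scan for the last key equal to it) by one fold over the items that keeps a running (argmax, max) pair, updating on >= so the last tied user wins.
import Mathlib
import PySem

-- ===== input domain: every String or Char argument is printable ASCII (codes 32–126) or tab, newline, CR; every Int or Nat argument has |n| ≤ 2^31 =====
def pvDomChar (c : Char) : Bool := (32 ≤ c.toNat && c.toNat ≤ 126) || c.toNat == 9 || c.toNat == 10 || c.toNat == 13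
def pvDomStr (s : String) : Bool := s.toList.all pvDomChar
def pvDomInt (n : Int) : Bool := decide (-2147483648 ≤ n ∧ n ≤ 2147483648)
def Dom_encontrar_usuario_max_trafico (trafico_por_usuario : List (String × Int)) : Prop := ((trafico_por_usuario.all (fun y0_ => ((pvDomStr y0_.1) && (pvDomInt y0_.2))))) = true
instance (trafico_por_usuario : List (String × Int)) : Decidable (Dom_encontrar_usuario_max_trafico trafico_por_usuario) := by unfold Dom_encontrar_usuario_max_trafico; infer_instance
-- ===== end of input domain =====

-- B replaces A's two passes (max over the values, then a scan for the last key equal to it)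
-- by one fold over the items keeping a running (argmax, max) pair (>= keeps the last tied user).
-- On the empty dict both Pythons raise (A: ValueError from max, B: StopIteration from next); Pre_ excludes it.

-- ===== PORT A =====
def encontrar_usuario_max_trafico (trafico_por_usuario : List (String × Int)) : String × Int :=
  match PySem.List.max? (trafico_por_usuario.map Prod.snd) (fun y => y) with
  | none => ("", 0)  -- Python's max raises ValueError here; excluded by Pre_
  | some trafico_maximo =>
      let usuario_max_trafico := trafico_por_usuario.foldl
        (fun acc p => if p.2 = trafico_maximo then some p.1 else acc) (none : Option String)
      (usuario_max_trafico.getD "", trafico_maximo)  -- the fold always yields some; "" is unreachable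

-- ===== PORT B =====
def encontrar_usuario_max_trafico_alt (trafico_por_usuario : List (String × Int)) : String × Int :=
  match trafico_por_usuario with
  | [] => ("", 0)  -- Python's next raises StopIteration here; excluded by Pre_
  | p :: items => items.foldl (fun best q => if best.2 ≤ q.2 then q else best) p

-- ===== PRECONDITION & SPEC =====
-- Both Pythons raise on the empty dict; Pre_ excludes exactly that input.
def Pre_encontrar_usuario_max_trafico (trafico_por_usuario : List (String × Int)) : Prop :=
  trafico_por_usuario ≠ []
instance (trafico_por_usuario : List (String × Int)) : Decidable (Pre_encontrar_usuario_max_trafico trafico_por_usuario) := by unfold Pre_encontrar_usuario_max_trafico; infer_instance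

def pvWitness_encontrar_usuario_max_trafico : (List (String × Int)) := [("ana", 3), ("bob", 7), ("cleo", 7)]

def Spec_encontrar_usuario_max_trafico (trafico_por_usuario : List (String × Int)) (out : String × Int) : Prop := out = encontrar_usuario_max_trafico_alt trafico_por_usuario
instance (trafico_por_usuario : List (String × Int)) (out : String × Int) : Decidable (Spec_encontrar_usuario_max_trafico trafico_por_usuario out) := by unfold Spec_encontrar_usuario_max_trafico; infer_instance

-- ===== CLAIM (what is proved, stated in full; the proofs are below) =====
def Claim_equal_encontrar_usuario_max_trafico : Prop := ∀ (trafico_por_usuario : List (String × Int)), Dom_encontrar_usuario_max_trafico trafico_por_usuario → Pre_encontrar_usuario_max_trafico trafico_por_usuario → Spec_encontrar_usuario_max_trafico trafico_por_usuario (encontrar_usuario_max_trafico trafico_por_usuario)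

-- ===== LEMMAS AND PROOFS =====

-- value of B's running pair = running max of the values
theorem alt_snd (rest : List (String × Int)) (p : String × Int) :
    (rest.foldl (fun best q => if best.2 ≤ q.2 then q else best) p).2
      = (rest.map Prod.snd).foldl max p.2 := by
  induction rest generalizing p with
  | nil => rfl
  | cons q rest ih =>
      simp only [List.foldl, List.map]
      rw [ih]
      by_cases h : p.2 ≤ q.2 <;> simp [h, max_def]

-- A's last-match scan, started after the head, equals some of B's argmax
theorem arg_eq (rest : List (String × Int)) (p : String × Int) :
    (p :: rest).foldl
        (fun acc q => if q.2 = (rest.map Prod.snd).foldl max p.2 then some q.1 else acc)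
        (none : Option String)
      = some (rest.foldl (fun best q => if best.2 ≤ q.2 then q else best) p).1 := by
  induction rest generalizing p with
  | nil => simp [List.foldl]
  | cons q rest ih =>
      have hbound := PySem.List.le_foldl_max (rest.map Prod.snd) (max p.2 q.2)
      have hm : (List.map Prod.snd (q :: rest)).foldl max p.2
          = (rest.map Prod.snd).foldl max (if p.2 ≤ q.2 then q else p).2 := by
        by_cases h : p.2 ≤ q.2 <;> simp [h, max_def]
      have hq : q.2 ≤ (List.map Prod.snd (q :: rest)).foldl max p.2 := by
        simp only [List.map, List.foldl]
        exact le_trans (le_max_right p.2 q.2) hbound.1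
      have hp : p.2 ≤ (List.map Prod.snd (q :: rest)).foldl max p.2 := by
        simp only [List.map, List.foldl]
        exact le_trans (le_max_left p.2 q.2) hbound.1
      generalize hM : (List.map Prod.snd (q :: rest)).foldl max p.2 = M at hp hq hm ⊢
      have ih' := ih (if p.2 ≤ q.2 then q else p)
      rw [← hm] at ih'
      simp only [List.foldl] at ih' ⊢
      have key : (if q.2 = M then some q.1 else if p.2 = M then some p.1 else none)
          = (if (if p.2 ≤ q.2 then q else p).2 = M then some (if p.2 ≤ q.2 then q else p).1
             else none) := by
        by_cases h : p.2 ≤ q.2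
        · simp only [if_pos h]
          split_ifs with h1 h2 <;> first | rfl | omega
        · simp only [if_neg h]
          split_ifs with h1 h2 <;> first | rfl | omega
      rw [key]
      exact ih'

-- ===== VERDICT (by name: the statement is the Claim_ definition above) =====
theorem encontrar_usuario_max_trafico_spec : Claim_equal_encontrar_usuario_max_trafico := by
  intro l _ hpre
  unfold Spec_encontrar_usuario_max_trafico
  match l with
  | [] => exact absurd rfl hpre
  | p :: rest =>
      unfold encontrar_usuario_max_trafico encontrar_usuario_max_trafico_alt
      rw [show (List.map Prod.snd (p :: rest)) = p.2 :: rest.map Prod.snd from rfl,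
          PySem.List.max?_id_cons]
      simp only
      rw [arg_eq rest p, Option.getD_some, ← alt_snd rest p]
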